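-- pv_equiv track=rewrite | github.com/ThBlitz/Crypto-Trading-Bot | tools.py | id_parser
-- ===== SOURCE A (Python) =====
-- def id_parser(id):
--     id = id.split('_')
--     id.pop(-1)
--     id_ = ''
--     for i in id:
--         id_ = id_ + i
--         id_ = id_ + '_'
--     id = id_
--     return id
-- ===== SOURCE B (Python) =====
-- def id_parser(id):
--     return id[:id.rfind('_') + 1]
-- ===== Notes on version B (the rewrite author's own statement) =====
-- stated objective: simpler
-- what changed: Replaces split/pop/rebuild-loop with a single closed-form slice up to (and including) the last underscore found by rfind.
import Mathlib
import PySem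

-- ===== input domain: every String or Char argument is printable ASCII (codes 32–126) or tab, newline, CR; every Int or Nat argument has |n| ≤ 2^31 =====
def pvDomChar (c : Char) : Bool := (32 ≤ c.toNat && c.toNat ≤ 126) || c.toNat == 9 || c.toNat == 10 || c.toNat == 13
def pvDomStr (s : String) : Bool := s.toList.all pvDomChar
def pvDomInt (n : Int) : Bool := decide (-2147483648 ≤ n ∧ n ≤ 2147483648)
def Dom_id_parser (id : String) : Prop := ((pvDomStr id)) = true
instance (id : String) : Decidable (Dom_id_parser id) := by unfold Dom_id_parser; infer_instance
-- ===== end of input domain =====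

-- B replaces A's split/pop/rebuild-loop by a single slice up to (and including) the last '_' (rfind); same return value everywhere.

-- ===== PORT A =====
def id_parser (id : String) : String :=
  match PySem.Str.split? id "_" with
  | none => ""            -- unreachable: the separator "_" is nonempty
  | some parts =>
    match PySem.List.pop? parts (-1) with
    | none => ""          -- unreachable: split always returns a nonempty list
    | some (_, rest) => rest.foldl (fun id_ i => (id_ ++ i) ++ "_") ""

-- ===== PORT B =====
def id_parser_alt (id : String) : String :=
  PySem.Str.slice id none (some (PySem.Str.rfind id "_" + 1))

-- ===== PRECONDITION & SPEC =====
def Spec_id_parser (id : String) (out : String) : Prop := out = id_parser_alt id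
instance (id : String) (out : String) : Decidable (Spec_id_parser id out) := by unfold Spec_id_parser; infer_instance

-- ===== CLAIM (what is proved, stated in full; the proofs are below) =====
def Claim_equal_id_parser : Prop := ∀ (id : String), Dom_id_parser id → Spec_id_parser id (id_parser id)

-- ===== LEMMAS AND PROOFS =====

-- the common target: everything up to and including the last '_' of cs ([] if there is none)
def pvKeep (cs : List Char) : List Char := (cs.reverse.dropWhile (fun c => c != '_')).reverse
theorem pv_splitOn_go (fuel : Nat) :
    ∀ (l cur : List Char) (accs : List (List Char)), l.length ≤ fuel →
      PySem.Chars.splitOn.go ['_'] fuel l cur accs =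
        accs.reverse ++ (List.splitOnP (fun c => c == '_') l).modifyHead (cur.reverse ++ ·) := by
  induction fuel with
  | zero =>
    intro l cur accs h
    have : l = [] := by simpa using List.length_eq_zero_iff.mp (Nat.le_zero.mp h)
    subst this
    simp [PySem.Chars.splitOn.go, List.splitOnP_nil]
  | succ f ih =>
    intro l cur accs h
    cases l with
    | nil => simp [PySem.Chars.splitOn.go, List.splitOnP_nil]
    | cons c rest =>
      by_cases hc : c = '_'
      · subst hc
        rw [PySem.Chars.splitOn.go]
        simp only [List.isPrefixOf, beq_self_eq_true, Bool.and_true, if_pos]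
        simp only [List.length_cons, List.length_nil, List.drop_succ_cons, List.drop_zero]
        rw [ih rest [] (List.reverse cur :: accs) (by simpa using Nat.lt_succ_iff.mp (by simpa using h))]
        simp [List.splitOnP_cons]
        cases List.splitOnP (fun c => c == '_') rest with
        | nil => simp
        | cons s0 ss => simp
      · rw [PySem.Chars.splitOn.go]
        have hpre : (['_'].isPrefixOf (c :: rest)) = false := by
          simp [List.isPrefixOf]; exact fun hh => (hc hh.symm).elim
        rw [if_neg (by simp [hpre])]
        rw [ih rest (c :: cur) accs (by simpa using Nat.lt_succ_iff.mp (by simpa using h))]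
        simp [List.splitOnP_cons, hc]
        cases hS : List.splitOnP (fun c => c == '_') rest with
        | nil => exact absurd hS (List.splitOnP_ne_nil _ _)
        | cons s0 ss => simp [List.modifyHead]

theorem pv_splitOn_eq (cs : List Char) :
    PySem.Chars.splitOn cs ['_'] = List.splitOnP (fun c => c == '_') cs := by
  rw [PySem.Chars.splitOn, pv_splitOn_go (cs.length + 1) cs [] [] (by omega)]
  cases List.splitOnP (fun c => c == '_') cs with
  | nil => simp
  | cons s0 ss => simp

theorem pv_noUs_splitOnP (as : List Char) (h : '_' ∉ as) :
    List.splitOnP (fun c => c == '_') as = [as] := by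
  induction as with
  | nil => simp [List.splitOnP_nil]
  | cons a t ih =>
    have ha : a ≠ '_' := fun e => h (e ▸ List.mem_cons_self)
    rw [List.splitOnP_cons, if_neg (by simp [ha]), ih (fun m => h (List.mem_cons_of_mem _ m))]
    simp [List.modifyHead]

theorem pv_us_two_le (as : List Char) (h : '_' ∈ as) :
    2 ≤ (List.splitOnP (fun c => c == '_') as).length := by
  induction as with
  | nil => simp at h
  | cons a t ih =>
    rw [List.splitOnP_cons]
    by_cases ha : a = '_'
    · rw [if_pos (by simp [ha])]
      have := List.splitOnP_ne_nil (fun c : Char => c == '_') t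
      have : 1 ≤ (List.splitOnP (fun c : Char => c == '_') t).length :=
        Nat.one_le_iff_ne_zero.mpr (by simpa [List.length_eq_zero_iff] using this)
      simpa using this
    · rw [if_neg (by simp [ha])]
      have ht : '_' ∈ t := by cases List.mem_cons.mp h with
        | inl e => exact absurd e.symm ha
        | inr m => exact m
      simpa [List.length_modifyHead] using ih ht


theorem pv_A_eq (cs : List Char) :
    ((List.splitOnP (fun c => c == '_') cs).dropLast.map (· ++ ['_'])).flatten = pvKeep cs := by
  induction cs with
  | nil => simp [List.splitOnP_nil, pvKeep]
  | cons a as ih =>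
    rw [List.splitOnP_cons]
    by_cases ha : a = '_'
    · subst ha
      rw [if_pos (by simp)]
      cases hS : List.splitOnP (fun c => c == '_') as with
      | nil => exact absurd hS (List.splitOnP_ne_nil _ _)
      | cons s0 ss =>
        have ih' := ih; rw [hS] at ih'
        simp only [List.dropLast_cons₂, List.map_cons, List.flatten_cons]
        rw [ih']
        by_cases hnil : List.dropWhile (fun c => c != '_') as.reverse = []
        · simp [pvKeep, List.dropWhile_append, hnil]
        · simp [pvKeep, List.dropWhile_append, hnil]
    · rw [if_neg (by simp [ha])]
      by_cases hus : '_' ∈ as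
      · obtain ⟨s0, s1, ss, hS⟩ : ∃ s0 s1 ss, List.splitOnP (fun c => c == '_') as = s0 :: s1 :: ss := by
          have h2 := pv_us_two_le as hus
          cases hS : List.splitOnP (fun c => c == '_') as with
          | nil => exact absurd hS (List.splitOnP_ne_nil _ _)
          | cons x xs =>
            cases xs with
            | nil => rw [hS] at h2; simp at h2
            | cons y ys => exact ⟨x, y, ys, rfl⟩
        have ih' := ih; rw [hS] at ih'
        rw [hS]
        have hnil : List.dropWhile (fun c => c != '_') as.reverse ≠ [] := by
          rw [Ne, List.dropWhile_eq_nil_iff]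
          push Not
          exact ⟨'_', by simpa using hus, by simp⟩
        simp only [List.modifyHead, List.dropLast_cons₂, List.map_cons, List.flatten_cons] at *
        have hkeep : pvKeep (a :: as) = a :: pvKeep as := by
          simp [pvKeep, List.dropWhile_append, hnil]
        rw [hkeep, ← ih']
        simp
      · rw [pv_noUs_splitOnP as hus]
        have hnil : List.dropWhile (fun c => c != '_') as.reverse = [] := by
          rw [List.dropWhile_eq_nil_iff]
          intro x hx
          have : x ≠ '_' := fun e => hus (by rw [← e]; exact List.mem_reverse.mp hx)
          simpa using this
        simp [pvKeep, List.modifyHead, List.dropWhile_append, hnil, ha]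
theorem pv_usCond (l : List Char) : ['_'].isPrefixOf l = (l.head? == some '_') := by
  cases l <;> simp [List.isPrefixOf, eq_comm]

theorem pv_go_bounds (ds : List Char) (j : Nat) :
    -1 ≤ PySem.Chars.rfind.go ds ['_'] j ∧ PySem.Chars.rfind.go ds ['_'] j ≤ (j : Int) := by
  induction j with
  | zero =>
    rw [PySem.Chars.rfind.go]
    split <;> simp
  | succ j ih =>
    rw [PySem.Chars.rfind.go]
    split
    · constructor <;> omega
    · exact ⟨ih.1, le_trans ih.2 (by push_cast; omega)⟩

theorem pv_rfind_bounds (ds : List Char) :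
    -1 ≤ PySem.Chars.rfind ds ['_'] ∧ PySem.Chars.rfind ds ['_'] < (ds.length : Int) := by
  rw [PySem.Chars.rfind]
  cases hl : ds.length with
  | zero =>
    have h0 : ds = [] := List.length_eq_zero_iff.mp hl
    subst h0
    rw [PySem.Chars.rfind.go]
    simp [List.isPrefixOf]
  | succ m =>
    rw [PySem.Chars.rfind.go]
    rw [if_neg (by rw [pv_usCond, List.drop_eq_nil_of_le (Nat.le_of_eq hl)]; simp)]
    have hb := pv_go_bounds ds m
    exact ⟨hb.1, lt_of_le_of_lt hb.2 (by push_cast; omega)⟩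

theorem pv_go_append (ds : List Char) (c : Char) (hc : c ≠ '_') :
    ∀ j, j ≤ ds.length →
      PySem.Chars.rfind.go (ds ++ [c]) ['_'] j = PySem.Chars.rfind.go ds ['_'] j := by
  intro j
  induction j with
  | zero =>
    intro _
    rw [PySem.Chars.rfind.go, PySem.Chars.rfind.go, pv_usCond, pv_usCond]
    cases ds with
    | nil => simp [hc]
    | cons d t => simp
  | succ j ih =>
    intro hj
    rw [PySem.Chars.rfind.go, PySem.Chars.rfind.go, pv_usCond, pv_usCond]
    rcases Nat.lt_or_ge (j+1) ds.length with hlt | hge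
    · have hdrop : (ds ++ [c]).drop (j+1) = ds.drop (j+1) ++ [c] :=
        List.drop_append_of_le_length hj
      rw [hdrop]
      have hne : ds.drop (j+1) ≠ [] := by
        simpa [List.drop_eq_nil_iff] using hlt
      cases hd : ds.drop (j+1) with
      | nil => exact absurd hd hne
      | cons x xs => simp [ih (by omega)]
    · have heq : j + 1 = ds.length := by omega
      have h1 : (ds ++ [c]).drop (j+1) = [c] := by
        rw [List.drop_append_of_le_length hj, List.drop_eq_nil_of_le heq.ge]
        simp
      have h2 : ds.drop (j+1) = [] := List.drop_eq_nil_of_le heq.ge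
      rw [h1, h2]
      simp [hc, ih (by omega)]

theorem pv_rfind_append (ds : List Char) (c : Char) :
    PySem.Chars.rfind (ds ++ [c]) ['_'] =
      if c = '_' then (ds.length : Int) else PySem.Chars.rfind ds ['_'] := by
  rw [PySem.Chars.rfind]
  have hlen : (ds ++ [c]).length = ds.length + 1 := by simp
  rw [hlen, PySem.Chars.rfind.go]
  rw [if_neg (by rw [pv_usCond, List.drop_eq_nil_of_le (le_of_eq hlen)]; simp)]
  cases hl : ds.length with
  | zero =>
    have h0 : ds = [] := List.length_eq_zero_iff.mp hl
    subst h0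
    rw [PySem.Chars.rfind.go, pv_usCond]
    by_cases hc : c = '_'
    · subst hc; simp
    · simp [hc, PySem.Chars.rfind, PySem.Chars.rfind.go, List.isPrefixOf]
  | succ m =>
    rw [PySem.Chars.rfind.go, pv_usCond]
    have hdl : (ds ++ [c]).drop (m+1) = [c] := by
      rw [← hl]; exact List.drop_left
    rw [hdl]
    by_cases hc : c = '_'
    · subst hc; simp
    · rw [if_neg (by simpa using hc), if_neg hc]
      rw [PySem.Chars.rfind, hl, PySem.Chars.rfind.go]
      rw [if_neg (by rw [pv_usCond, List.drop_eq_nil_of_le (Nat.le_of_eq hl)]; simp)]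
      exact pv_go_append ds c hc m (by omega)


theorem pvKeep_append_us (ds : List Char) : pvKeep (ds ++ ['_']) = ds ++ ['_'] := by
  simp [pvKeep]

theorem pvKeep_append_ne (ds : List Char) (c : Char) (hc : c ≠ '_') :
    pvKeep (ds ++ [c]) = pvKeep ds := by
  simp [pvKeep, hc]

theorem pv_B_eq (cs : List Char) :
    List.take (PySem.Chars.rfind cs ['_'] + 1).toNat cs = pvKeep cs := by
  induction cs using List.reverseRecOn with
  | nil => rw [PySem.Chars.rfind]; rw [PySem.Chars.rfind.go.eq_def]; simp [List.isPrefixOf, pvKeep]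
  | append_singleton ds c ih =>
    rw [pv_rfind_append]
    by_cases hc : c = '_'
    · subst hc
      rw [if_pos rfl, pvKeep_append_us]
      have ht : ((ds.length : Int) + 1).toNat = ds.length + 1 := by omega
      rw [ht]
      exact List.take_of_length_le (by simp)
    · rw [if_neg hc, pvKeep_append_ne ds c hc]
      have hb := pv_rfind_bounds ds
      have hle : (PySem.Chars.rfind ds ['_'] + 1).toNat ≤ ds.length := by omega
      rw [List.take_append_of_le_length hle]
      exact ih

theorem pv_fold_toList (L : List (List Char)) (init : String) :
    ((L.map String.ofList).foldl (fun a i => (a ++ i) ++ "_") init).toList =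
      L.foldl (fun a i => (a ++ i) ++ ['_']) init.toList := by
  induction L generalizing init with
  | nil => simp
  | cons x xs ih => simp [ih]

theorem pv_foldl_flatten (L : List (List Char)) (init : List Char) :
    L.foldl (fun a i => (a ++ i) ++ ['_']) init = init ++ (L.map (· ++ ['_'])).flatten := by
  induction L generalizing init with
  | nil => simp
  | cons x xs ih => simp [List.foldl_cons, List.append_assoc]

theorem pv_main (id : String) : id_parser id = id_parser_alt id := by
  have hS := pv_splitOn_eq id.toList
  have hSne : List.splitOnP (fun c => c == '_') id.toList ≠ [] := List.splitOnP_ne_nil _ _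
  have hmne : (List.splitOnP (fun c => c == '_') id.toList).map String.ofList ≠ [] := by
    simpa using hSne
  have hsplit : PySem.Str.split? id "_" =
      some ((List.splitOnP (fun c => c == '_') id.toList).map String.ofList) := by
    rw [PySem.Str.split?, PySem.Chars.split?]
    rw [show "_".toList = ['_'] from rfl, hS]
    simp
  have hpop : PySem.List.pop? ((List.splitOnP (fun c => c == '_') id.toList).map String.ofList) (-1) =
      some (((List.splitOnP (fun c => c == '_') id.toList).map String.ofList).getLast hmne,
            ((List.splitOnP (fun c => c == '_') id.toList).map String.ofList).dropLast) := by
    conv_lhs => rw [← List.dropLast_append_getLast hmne]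
    exact PySem.List.pop?_last _ _
  apply String.ext
  rw [id_parser, hsplit]
  simp only []
  rw [hpop]
  simp only []
  rw [← List.map_dropLast, pv_fold_toList]
  rw [pv_foldl_flatten]
  rw [show ("" : String).toList = [] from rfl, List.nil_append]
  rw [pv_A_eq]
  rw [id_parser_alt, PySem.Str.slice]
  rw [String.toList_ofList]
  rw [show PySem.Chars.slice id.toList none (some (PySem.Str.rfind id "_" + 1)) =
        PySem.List.slice id.toList none (some (PySem.Str.rfind id "_" + 1)) from
    PySem.Chars.slice_eq_listSlice _ _ _]
  rw [show PySem.Str.rfind id "_" = PySem.Chars.rfind id.toList ['_'] from rfl]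
  rw [PySem.List.slice_to _ (by have := (pv_rfind_bounds id.toList).1; omega)]
  exact (pv_B_eq id.toList).symm

-- ===== VERDICT (by name: the statement is the Claim_ definition above) =====
theorem id_parser_spec : Claim_equal_id_parser := by
  intro id _
  unfold Spec_id_parser
  exact pv_main id
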